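-- pv_equiv track=rewrite | github.com/beckpiscopo/noeron | scripts/context_card_builder.py | _sanitize_window_id
-- ===== SOURCE A (Python) =====
-- from typing import Iterable, List, Optional, Tuple, Dict, Any, Mapping
--
-- def _sanitize_window_id(value: Optional[str]) -> str:
--     if not value:
--         return "unknown_window"
--     cleaned = value.strip()
--     if not cleaned:
--         return "unknown_window"
--     for delimiter in ("-->", "align:start", "|", "#"):
--         if delimiter in cleaned:
--             cleaned = cleaned.split(delimiter, 1)[0].strip()
--     if not cleaned:
--         return "unknown_window"
--     return cleaned
-- ===== SOURCE B (Python) =====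
-- def _sanitize_window_id(value):
--     if not value:
--         return "unknown_window"
--     cleaned = value.strip()
--     if not cleaned:
--         return "unknown_window"
--     positions = [p for p in (cleaned.find(d) for d in ("-->", "align:start", "|", "#")) if p != -1]
--     cut = min(positions, default=len(cleaned))
--     cleaned = cleaned[:cut].strip()
--     return cleaned or "unknown_window"
-- ===== Notes on version B (the rewrite author's own statement) =====
-- stated objective: simpler
-- what changed: Replaces the sequential truncate-and-rescan loop (split on each delimiter in turn, re-stripping after every cut) by computing every delimiter's first occurrence with find, cutting once at the minimum position, and stripping once; exact because the delimiters are pairwise non-overlapping and whitespace-free.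
import Mathlib
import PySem

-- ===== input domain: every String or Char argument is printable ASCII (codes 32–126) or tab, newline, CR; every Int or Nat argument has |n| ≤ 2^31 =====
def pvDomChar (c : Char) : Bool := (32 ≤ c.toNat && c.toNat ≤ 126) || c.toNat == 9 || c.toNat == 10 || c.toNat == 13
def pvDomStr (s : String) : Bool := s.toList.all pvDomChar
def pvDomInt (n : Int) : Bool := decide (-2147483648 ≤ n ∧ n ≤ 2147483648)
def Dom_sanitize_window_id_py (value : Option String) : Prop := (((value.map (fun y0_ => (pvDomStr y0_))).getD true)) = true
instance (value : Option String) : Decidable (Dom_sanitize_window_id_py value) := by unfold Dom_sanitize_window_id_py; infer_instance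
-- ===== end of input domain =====

-- B replaces A's sequential truncate-and-rescan delimiter loop by one pass that gathers each
-- delimiter's first `find` position, cuts once at the minimum, and strips once (objective: simpler).

-- ===== PORT A =====
def sanitize_window_id_py (value : Option String) : String :=
  match value with
  | none => "unknown_window"
  | some v =>
    if v = "" then "unknown_window"
    else
      let cleaned := PySem.Str.strip v
      if cleaned = "" then "unknown_window"
      else
        -- for delimiter in (...): if delimiter in cleaned: cleaned = cleaned.split(delimiter, 1)[0].strip()
        -- `.split(sep, 1)` with nonempty sep always yields a nonempty list, so `[0]` is its head
        let cleaned := (["-->", "align:start", "|", "#"]).foldl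
          (fun c d =>
            if PySem.Str.isIn d c then
              PySem.Str.strip (((PySem.Str.splitMax? c d 1).getD []).headD "")
            else c) cleaned
        if cleaned = "" then "unknown_window" else cleaned

-- ===== PORT B =====
def sanitize_window_id_py_alt (value : Option String) : String :=
  match value with
  | none => "unknown_window"
  | some v =>
    if v = "" then "unknown_window"
    else
      let cleaned := PySem.Str.strip v
      if cleaned = "" then "unknown_window"
      else
        let positions := ((["-->", "align:start", "|", "#"]).map
          (fun d => PySem.Str.find cleaned d)).filter (fun p => p != -1)
        let cut := PySem.List.minD positions (fun p => p) (PySem.Str.len cleaned)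
        let res := PySem.Str.strip (PySem.Str.slice cleaned none (some cut))
        if res = "" then "unknown_window" else res

-- ===== PRECONDITION & SPEC =====
def Spec_sanitize_window_id_py (value : Option String) (out : String) : Prop := out = sanitize_window_id_py_alt value
instance (value : Option String) (out : String) : Decidable (Spec_sanitize_window_id_py value out) := by unfold Spec_sanitize_window_id_py; infer_instance

-- ===== CLAIM (what is proved, stated in full; the proofs are below) =====
def Claim_equal_sanitize_window_id_py : Prop := ∀ (value : Option String), Dom_sanitize_window_id_py value → Spec_sanitize_window_id_py value (sanitize_window_id_py value)

-- ===== LEMMAS AND PROOFS =====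

-- cut position contributed by one delimiter: first occurrence, or the length when absent
def pvCut (c d : List Char) : Nat :=
  if PySem.Chars.find c d = -1 then c.length else (PySem.Chars.find c d).toNat

def pvMinCut (c : List Char) (ds : List (List Char)) : Nat :=
  ds.foldr (fun d m => min (pvCut c d) m) c.length

-- A's loop body / loop, on the List Char side
def pvStep (c d : List Char) : List Char :=
  if PySem.Chars.isIn d c then
    PySem.Chars.strip (((PySem.Chars.splitMax? c d 1).getD []).headD [])
  else c

def pvLoop (c : List Char) (ds : List (List Char)) : List Char := ds.foldl pvStep c

-- find.go with a shifted start counter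
theorem pv_find_go (sub : List Char) (hs : sub ≠ []) :
    ∀ (l : List Char) (k : Nat), PySem.Chars.find.go sub l k =
      if PySem.Chars.find l sub = -1 then -1 else PySem.Chars.find l sub + ↑k := by
  intro l
  induction l with
  | nil =>
    intro k
    simp [PySem.Chars.find, PySem.Chars.find.go, List.isEmpty_iff, hs]
  | cons c t ih =>
    intro k
    rw [PySem.Chars.find.go]
    by_cases hp : sub.isPrefixOf (c :: t) = true
    · have hf : PySem.Chars.find (c :: t) sub = 0 := by
        rw [PySem.Chars.find, PySem.Chars.find.go, if_pos hp]
        rfl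
      rw [if_pos hp, hf]
      simp
    · rw [if_neg hp]
      have hf : PySem.Chars.find (c :: t) sub =
          if PySem.Chars.find t sub = -1 then -1 else PySem.Chars.find t sub + 1 := by
        rw [PySem.Chars.find, PySem.Chars.find.go, if_neg hp, ih 1]
        norm_num
      rw [ih (k + 1), hf]
      by_cases h1 : PySem.Chars.find t sub = -1
      · simp [h1]
      · have h0 : 0 ≤ PySem.Chars.find t sub := by
          have := PySem.Chars.neg_one_le_find t sub; omega
        simp only [if_neg h1]
        rw [if_neg (by omega : ¬ PySem.Chars.find t sub + 1 = -1)]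
        push_cast
        ring

theorem pv_find_cons (sub : List Char) (hs : sub ≠ []) (c : Char) (t : List Char) :
    PySem.Chars.find (c :: t) sub =
      if sub.isPrefixOf (c :: t) then 0
      else if PySem.Chars.find t sub = -1 then -1 else PySem.Chars.find t sub + 1 := by
  rw [PySem.Chars.find, PySem.Chars.find.go]
  by_cases hp : sub.isPrefixOf (c :: t) = true
  · simp [hp]
  · simp only [hp, if_false, Bool.false_eq_true]
    rw [pv_find_go sub hs t 1]
    simp

-- splitOnMax.go with maxsplit exhausted
theorem pv_go0 (d : List Char) (fuel : Nat) (l cur : List Char) (acc : List (List Char)) :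
    PySem.Chars.splitOnMax.go d fuel 0 l cur acc = ((cur.reverse ++ l) :: acc).reverse := by
  cases fuel with
  | zero => rw [PySem.Chars.splitOnMax.go]
  | succ n => cases l with
    | nil =>
      rw [PySem.Chars.splitOnMax.go]
      · simp
      · intro h; omega
    | cons c rest =>
      rw [PySem.Chars.splitOnMax.go]
      simp

-- splitOnMax.go with maxsplit = 1: one piece before the first occurrence, the rest after it
theorem pv_go1 (d : List Char) (hd : d ≠ []) :
    ∀ (fuel : Nat) (l cur : List Char) (acc : List (List Char)), l.length < fuel →
      PySem.Chars.splitOnMax.go d fuel 1 l cur acc =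
        acc.reverse ++ (if PySem.Chars.find l d = -1 then [cur.reverse ++ l]
          else [cur.reverse ++ l.take (PySem.Chars.find l d).toNat,
                l.drop ((PySem.Chars.find l d).toNat + d.length)]) := by
  intro fuel
  induction fuel with
  | zero => intro l cur acc h; omega
  | succ n ih =>
    intro l cur acc h
    cases l with
    | nil =>
      rw [PySem.Chars.splitOnMax.go]
      · have : PySem.Chars.find [] d = -1 := by
          simp [PySem.Chars.find, PySem.Chars.find.go, List.isEmpty_iff, hd]
        simp [this]
      · intro h; omega
    | cons c rest =>
      rw [PySem.Chars.splitOnMax.go]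
      simp only [Nat.succ_ne_zero, if_false, reduceIte]
      by_cases hp : d.isPrefixOf (c :: rest) = true
      · simp only [hp, if_true]
        rw [pv_go0]
        have hf : PySem.Chars.find (c :: rest) d = 0 := by
          rw [pv_find_cons d hd]; simp [hp]
        simp [hf]
      · simp only [hp, Bool.false_eq_true, if_false]
        rw [ih rest (c :: cur) acc (by simp at h ⊢; omega)]
        have hf := pv_find_cons d hd c rest
        rw [if_neg (by simp [hp])] at hf
        by_cases h1 : PySem.Chars.find rest d = -1
        · simp [hf, h1]
        · have hge : 0 ≤ PySem.Chars.find rest d := by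
            have := PySem.Chars.neg_one_le_find rest d; omega
          rw [if_neg h1] at hf
          have ht : (PySem.Chars.find (c :: rest) d).toNat = (PySem.Chars.find rest d).toNat + 1 := by
            rw [hf]; omega
          have hne : PySem.Chars.find (c :: rest) d ≠ -1 := by rw [hf]; omega
          simp only [hne, if_false, h1, reduceIte, ht]
          simp [List.take_succ_cons, List.drop_succ_cons, Nat.add_right_comm]

-- A's step: split-take-strip equals strip of the prefix up to the cut position
theorem pv_split_head (d : List Char) (hd : d ≠ []) (c : List Char) :
    ((PySem.Chars.splitMax? c d 1).getD []).headD [] = c.take (pvCut c d) := by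
  rw [PySem.Chars.splitMax?, if_neg (by simp [List.isEmpty_iff, hd])]
  rw [PySem.Chars.splitOnMax, if_neg (by omega)]
  have h1 : (1 : Int).toNat = 1 := rfl
  rw [h1, pv_go1 d hd (c.length + 1) c [] [] (by omega)]
  unfold pvCut
  by_cases hf : PySem.Chars.find c d = -1 <;> simp [hf]

theorem pv_step_eq (c d : List Char) (hd : d ≠ []) :
    pvStep c d = if PySem.Chars.isIn d c then PySem.Chars.strip (c.take (pvCut c d)) else c := by
  unfold pvStep
  rw [pv_split_head d hd c]

-- ---- strip structure ----

theorem pv_dropWhile_prefix {p : Char → Bool} {c y : List Char}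
    (hc : List.dropWhile p c = c) (hy : y <+: c) : List.dropWhile p y = y := by
  rw [List.dropWhile_eq_self_iff] at hc ⊢
  intro hl
  have hlc : 0 < c.length := by
    have := hy.length_le; omega
  have := hy.getElem (i := 0) hl
  rw [this]
  exact hc hlc

theorem pv_lstrip_prefix {c y : List Char} (hc : PySem.Chars.lstrip c = c) (hy : y <+: c) :
    PySem.Chars.lstrip y = y :=
  pv_dropWhile_prefix hc hy

theorem pv_rstrip_take (c : List Char) :
    PySem.Chars.rstrip c = c.take (PySem.Chars.rstrip c).length ∧
      ∀ x ∈ c.drop (PySem.Chars.rstrip c).length, PySem.Chars.isspace x = true := by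
  have hr : PySem.Chars.rstrip c = (List.dropWhile PySem.Chars.isspace c.reverse).reverse := rfl
  set r := (List.dropWhile PySem.Chars.isspace c.reverse).reverse with hrdef
  set t := (List.takeWhile PySem.Chars.isspace c.reverse).reverse with htdef
  have hsplit : c = r ++ t := by
    rw [hrdef, htdef, ← List.reverse_append, List.takeWhile_append_dropWhile, List.reverse_reverse]
  rw [hr]
  constructor
  · conv_rhs => rw [hsplit]
    exact List.take_left.symm
  · intro x hx
    rw [hsplit, List.drop_left] at hx
    rw [htdef, List.mem_reverse] at hx
    exact List.mem_takeWhile_imp hx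

theorem pv_rstrip_prefix (c : List Char) : PySem.Chars.rstrip c <+: c := by
  rw [(pv_rstrip_take c).1]
  exact List.take_prefix _ _

theorem pv_strip_eq_rstrip {c : List Char} (hc : PySem.Chars.lstrip c = c) :
    PySem.Chars.strip c = PySem.Chars.rstrip c := by
  rw [PySem.Chars.strip, hc]

theorem pv_dropWhile_idem (p : Char → Bool) (l : List Char) :
    List.dropWhile p (List.dropWhile p l) = List.dropWhile p l :=
  List.dropWhile_idempotent p l

theorem pv_rstrip_idem (c : List Char) :
    PySem.Chars.rstrip (PySem.Chars.rstrip c) = PySem.Chars.rstrip c := by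
  rw [PySem.Chars.rstrip, PySem.Chars.rstrip, List.reverse_reverse, pv_dropWhile_idem]

theorem pv_lstrip_strip (c : List Char) :
    PySem.Chars.lstrip (PySem.Chars.strip c) = PySem.Chars.strip c := by
  have h1 : PySem.Chars.lstrip (PySem.Chars.lstrip c) = PySem.Chars.lstrip c :=
    pv_dropWhile_idem _ _
  exact pv_lstrip_prefix h1 (pv_rstrip_prefix (PySem.Chars.lstrip c))

theorem pv_strip_idem (c : List Char) :
    PySem.Chars.strip (PySem.Chars.strip c) = PySem.Chars.strip c := by
  rw [pv_strip_eq_rstrip (pv_lstrip_strip c), PySem.Chars.strip, pv_rstrip_idem]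

theorem pv_lstrip_of_strip {c : List Char} (hc : PySem.Chars.strip c = c) :
    PySem.Chars.lstrip c = c := by
  have hsuf : PySem.Chars.lstrip c <:+ c := List.dropWhile_suffix _
  have h1 : c.length ≤ (PySem.Chars.lstrip c).length := by
    have := (pv_rstrip_prefix (PySem.Chars.lstrip c)).length_le
    rw [← PySem.Chars.strip, hc] at this
    exact this
  exact hsuf.eq_of_length (by have := hsuf.length_le; omega)

-- ---- occurrence lemmas ----

theorem pv_isIn_iff (c d : List Char) : PySem.Chars.isIn d c = true ↔ PySem.Chars.find c d ≠ -1 := by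
  rw [PySem.Chars.isIn]; simp

theorem pv_not_occ_lt_cut {c d : List Char} {j : Nat} (h : j < pvCut c d) :
    ¬ d <+: c.drop j := by
  intro hocc
  unfold pvCut at h
  by_cases hf : PySem.Chars.find c d = -1
  · rw [PySem.Chars.find_eq_neg_one_iff] at hf
    have hin : PySem.Chars.isIn d c = true :=
      (PySem.Chars.exists_prefix_drop_iff_isIn d c).1 ⟨j, hocc⟩
    exact hf ((PySem.Chars.isIn_iff_infix d c).1 hin)
  · rw [if_neg hf] at h
    have h0 : 0 ≤ PySem.Chars.find c d := by
      have := PySem.Chars.neg_one_le_find c d; omega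
    exact (PySem.Chars.find_spec h0).2 j h hocc

theorem pv_occ_of_cut_lt {c d : List Char} (h : pvCut c d < c.length) :
    d <+: c.drop (pvCut c d) := by
  unfold pvCut at *
  by_cases hf : PySem.Chars.find c d = -1
  · rw [if_pos hf] at h; omega
  · rw [if_neg hf] at *
    have h0 : 0 ≤ PySem.Chars.find c d := by
      have := PySem.Chars.neg_one_le_find c d; omega
    exact (PySem.Chars.find_spec h0).1

theorem pv_occ_of_isIn {c d : List Char} (h : PySem.Chars.isIn d c = true) :
    d <+: c.drop (pvCut c d) := by
  rw [pv_isIn_iff] at h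
  unfold pvCut
  rw [if_neg h]
  have h0 : 0 ≤ PySem.Chars.find c d := by
    have := PySem.Chars.neg_one_le_find c d; omega
  exact (PySem.Chars.find_spec h0).1

theorem pv_cut_eq {c d : List Char} {p : Nat} (h1 : d <+: c.drop p)
    (h2 : ∀ q < p, ¬ d <+: c.drop q) : pvCut c d = p := by
  have hin : PySem.Chars.isIn d c = true :=
    (PySem.Chars.exists_prefix_drop_iff_isIn d c).1 ⟨p, h1⟩
  rw [pv_isIn_iff] at hin
  unfold pvCut
  rw [if_neg hin]
  have h0 : 0 ≤ PySem.Chars.find c d := by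
    have := PySem.Chars.neg_one_le_find c d; omega
  have hs := PySem.Chars.find_spec h0
  by_contra hne
  rcases Nat.lt_or_ge (PySem.Chars.find c d).toNat p with hlt | hge
  · exact h2 _ hlt hs.1
  · exact hs.2 p (by omega) h1

theorem pv_cut_le (c d : List Char) : pvCut c d ≤ c.length := by
  unfold pvCut
  have := PySem.Chars.find_le_length c d
  by_cases hf : PySem.Chars.find c d = -1 <;> simp [hf] <;> omega

-- occurrences inside a take-prefix
theorem pv_occ_take {c d : List Char} {k j : Nat} :
    d <+: (c.take k).drop j ↔ d <+: c.drop j ∧ d.length ≤ k - j := by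
  rw [List.drop_take, List.prefix_take_iff]

-- an occurrence inside a double take-prefix is an occurrence in the base list
theorem pv_occ_through {c c' d' : List Char} {n k p : Nat}
    (hc' : c' = (c.take n).take k) (hocc : d' <+: c'.drop p) : d' <+: c.drop p := by
  rw [hc'] at hocc
  exact (pv_occ_take.1 (pv_occ_take.1 hocc).1).1

-- an occurrence of a whitespace-free delimiter survives rstrip
theorem pv_survive {c d : List Char} {j : Nat} (hd : d ≠ [])
    (hws : ∀ a ∈ d, PySem.Chars.isspace a = false) (hocc : d <+: c.drop j) :
    j + d.length ≤ (PySem.Chars.rstrip c).length := by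
  by_contra hcon
  push_neg at hcon
  set k := (PySem.Chars.rstrip c).length with hk
  have hdl : 0 < d.length := List.length_pos_iff.2 hd
  have hfit : d.length ≤ (c.drop j).length := hocc.length_le
  rw [List.length_drop] at hfit
  have hjlen : j + d.length ≤ c.length := by omega
  have hic : j + d.length - 1 < c.length := by omega
  -- the character at position j + |d| - 1 lies in the stripped tail, hence is whitespace
  have h1 : j + d.length - 1 - k < (c.drop k).length := by rw [List.length_drop]; omega
  have h2 : getElem (c.drop k) (j + d.length - 1 - k) h1 = getElem c (j + d.length - 1) hic := by
    rw [List.getElem_drop]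
    congr 1
    omega
  have hmem : getElem c (j + d.length - 1) hic ∈ c.drop k := by
    rw [← h2]
    exact List.getElem_mem h1
  have hws1 : PySem.Chars.isspace (getElem c (j + d.length - 1) hic) = true :=
    (pv_rstrip_take c).2 _ hmem
  -- but it is also the last character of d, hence not whitespace
  have hdi : d.length - 1 < d.length := by omega
  have h3 := hocc.getElem hdi
  have h5 : d.length - 1 < (c.drop j).length := by rw [List.length_drop]; omega
  have h4 : getElem (c.drop j) (d.length - 1) h5 = getElem c (j + d.length - 1) hic := by
    rw [List.getElem_drop]
    congr 1
    omega
  have hws2 : PySem.Chars.isspace (getElem c (j + d.length - 1) hic) = false := by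
    have hx : getElem d (d.length - 1) hdi = getElem c (j + d.length - 1) hic := by
      rw [h3]
      exact h4
    rw [← hx]
    exact hws _ (List.getElem_mem hdi)
  rw [hws1] at hws2
  exact absurd hws2 (by simp)

-- two delimiter occurrences cannot straddle when the first's head char does not occur in the other
theorem pv_no_straddle {c d d' : List Char} {n m : Nat} (ha : d.headI ∉ d') (hd : d ≠ [])
    (hocc : d <+: c.drop n) (hocc' : d' <+: c.drop m) (h1 : m < n) (h2 : n < m + d'.length) :
    False := by
  have hdl : 0 < d.length := List.length_pos_iff.2 hd
  have hlen := hocc.length_le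
  rw [List.length_drop] at hlen
  have hn : n < c.length := by omega
  have hlen' := hocc'.length_le
  rw [List.length_drop] at hlen'
  -- the character of c at position n is d's head
  have hz : (0 : Nat) < (c.drop n).length := by rw [List.length_drop]; omega
  have e1 : getElem (c.drop n) 0 hz = getElem c n hn := by
    rw [List.getElem_drop]
    simp
  have e2 := hocc.getElem (i := 0) hdl
  have e3 : getElem d 0 hdl = d.headI := by
    cases d with
    | nil => simp at hd
    | cons a t => rfl
  -- but it is also a character of d' (the occurrence straddles position n)
  have hnm : n - m < d'.length := by omega
  have e4 := hocc'.getElem hnm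
  have hy : n - m < (c.drop m).length := by rw [List.length_drop]; omega
  have e5 : getElem (c.drop m) (n - m) hy = getElem c n hn := by
    rw [List.getElem_drop]
    congr 1
    omega
  apply ha
  have heq : d.headI = getElem d' (n - m) hnm := by
    have t1 : d.headI = getElem c n hn := by
      rw [← e3, e2]
      exact e1
    have t2 : getElem d' (n - m) hnm = getElem c n hn := by
      rw [e4]
      exact e5
    rw [t1, t2]
  rw [heq]
  exact List.getElem_mem hnm

-- ---- minimum-cut lemmas ----

theorem pv_mc_cons (c d : List Char) (ds : List (List Char)) :
    pvMinCut c (d :: ds) = min (pvCut c d) (pvMinCut c ds) := rfl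

theorem pv_mc_le_len (c : List Char) (ds : List (List Char)) : pvMinCut c ds ≤ c.length := by
  induction ds with
  | nil => simp [pvMinCut]
  | cons d rest ih => rw [pv_mc_cons]; omega

theorem pv_mc_le_mem {c : List Char} {ds : List (List Char)} {d : List Char} (h : d ∈ ds) :
    pvMinCut c ds ≤ pvCut c d := by
  induction ds with
  | nil => simp at h
  | cons e rest ih =>
    rw [pv_mc_cons]
    rcases List.mem_cons.1 h with h1 | h1
    · rw [h1]; omega
    · have := ih h1; omega

theorem pv_le_mc {c : List Char} {ds : List (List Char)} {m : Nat} (h0 : m ≤ c.length)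
    (h : ∀ d ∈ ds, m ≤ pvCut c d) : m ≤ pvMinCut c ds := by
  induction ds with
  | nil => simpa [pvMinCut]
  | cons e rest ih =>
    rw [pv_mc_cons]
    have h1 := h e (List.mem_cons_self)
    have h2 := ih (fun d hd => h d (List.mem_cons_of_mem _ hd))
    omega

theorem pv_mc_attain {c : List Char} {ds : List (List Char)} (h : pvMinCut c ds < c.length) :
    ∃ d ∈ ds, pvCut c d = pvMinCut c ds := by
  induction ds with
  | nil => simp [pvMinCut] at h
  | cons e rest ih =>
    rw [pv_mc_cons] at h ⊢
    by_cases he : pvCut c e ≤ pvMinCut c rest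
    · exact ⟨e, List.mem_cons_self, by omega⟩
    · have h2 : pvMinCut c rest < c.length := by omega
      obtain ⟨d, hd, hcut⟩ := ih h2
      exact ⟨d, List.mem_cons_of_mem _ hd, by omega⟩

-- ---- MAIN: A's sequential loop computes the strip of the minimum-cut prefix ----

theorem pv_main : ∀ (ds : List (List Char)) (c : List Char),
    (∀ d ∈ ds, d ≠ [] ∧ ∀ a ∈ d, PySem.Chars.isspace a = false) →
    ds.Pairwise (fun d d' => d.headI ∉ d') →
    PySem.Chars.strip c = c →
    pvLoop c ds = PySem.Chars.strip (c.take (pvMinCut c ds)) := by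
  intro ds
  induction ds with
  | nil =>
    intro c _ _ hsc
    simp [pvLoop, pvMinCut, List.take_length, hsc]
  | cons d rest ih =>
    intro c hP hQ hsc
    have hPd := hP d List.mem_cons_self
    obtain ⟨hd, hws⟩ := hPd
    have hPrest : ∀ d' ∈ rest, d' ≠ [] ∧ ∀ a ∈ d', PySem.Chars.isspace a = false :=
      fun d' h => hP d' (List.mem_cons_of_mem _ h)
    rw [List.pairwise_cons] at hQ
    obtain ⟨hhd, hQrest⟩ := hQ
    have hloop : pvLoop c (d :: rest) = pvLoop (pvStep c d) rest := rfl
    rw [hloop, pv_step_eq c d hd, pv_mc_cons]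
    by_cases hin : PySem.Chars.isIn d c = true
    · rw [if_pos hin]
      -- d occurs: cut at n, strip, recurse
      set n := pvCut c d with hn
      set c' := PySem.Chars.strip (c.take n) with hc'
      have hlst : PySem.Chars.lstrip c = c := pv_lstrip_of_strip hsc
      have hlsttake : PySem.Chars.lstrip (c.take n) = c.take n :=
        pv_lstrip_prefix hlst (List.take_prefix _ _)
      have hc'r : c' = PySem.Chars.rstrip (c.take n) := by
        rw [hc', pv_strip_eq_rstrip hlsttake]
      have hsc' : PySem.Chars.strip c' = c' := by rw [hc']; exact pv_strip_idem _
      have hocc_d : d <+: c.drop n := pv_occ_of_isIn hin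
      have hnlen : n ≤ c.length := pv_cut_le c d
      have hc'len : c'.length ≤ n := by
        have h1 := (pv_rstrip_prefix (c.take n)).length_le
        rw [← hc'r] at h1
        have h2 : (c.take n).length ≤ n := by simp
        omega
      have hc'take : c' = (c.take n).take c'.length := by
        rw [hc'r]
        exact (pv_rstrip_take (c.take n)).1
      rw [ih c' hPrest hQrest hsc']
      set M := pvMinCut c rest with hM
      by_cases hMn : M < n
      · -- some later delimiter cuts earlier: the loop on c' cuts at M too
        have hMlen : M < c.length := by omega
        obtain ⟨d0, hd0mem, hd0cut⟩ := pv_mc_attain (by omega : pvMinCut c rest < c.length)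
        obtain ⟨hd0ne, hd0ws⟩ := hPrest d0 hd0mem
        have hocc0 : d0 <+: c.drop M := by
          rw [hM, ← hd0cut]
          exact pv_occ_of_cut_lt (by omega)
        have hfit : M + d0.length ≤ n := by
          by_contra hcon
          exact pv_no_straddle (hhd d0 hd0mem) hd hocc_d hocc0 hMn (by omega)
        have hocc0take : d0 <+: (c.take n).drop M :=
          pv_occ_take.2 ⟨hocc0, by omega⟩
        have hsurv : M + d0.length ≤ c'.length := by
          rw [hc'r]
          exact pv_survive hd0ne hd0ws hocc0take
        have hd0pos : 0 < d0.length := List.length_pos_iff.2 hd0ne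
        -- pvCut c' d0 = M
        have hcut0' : pvCut c' d0 = M := by
          apply pv_cut_eq
          · rw [hc'take]
            exact pv_occ_take.2 ⟨hocc0take, by omega⟩
          · intro q hq hocc
            have h2 := pv_occ_through hc'take hocc
            exact pv_not_occ_lt_cut (by omega : q < pvCut c d0) h2
        have hmc' : pvMinCut c' rest = M := by
          have hle : pvMinCut c' rest ≤ M := hcut0' ▸ pv_mc_le_mem hd0mem
          have hge : M ≤ pvMinCut c' rest := by
            apply pv_le_mc (by omega)
            intro d' hd'mem
            by_contra hcon
            push_neg at hcon
            have hlt' : pvCut c' d' < c'.length := by omega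
            have hocc' := pv_occ_of_cut_lt hlt'
            have h2 := pv_occ_through hc'take hocc'
            have h3 := pv_mc_le_mem (c := c) hd'mem
            exact pv_not_occ_lt_cut (by omega : pvCut c' d' < pvCut c d') h2
          omega
        rw [hmc']
        have htake : c'.take M = c.take (min n M) := by
          rw [hc'take, List.take_take, List.take_take]
          congr 1
          omega
        rw [htake]
      · -- the current cut is the earliest: nothing later fires inside c'
        have hmc' : pvMinCut c' rest = c'.length := by
          have hle : pvMinCut c' rest ≤ c'.length := pv_mc_le_len _ _
          have hge : c'.length ≤ pvMinCut c' rest := by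
            apply pv_le_mc (le_refl _)
            intro d' hd'mem
            by_contra hcon
            push_neg at hcon
            have hocc' := pv_occ_of_cut_lt hcon
            obtain ⟨hd'ne, _⟩ := hPrest d' hd'mem
            have hd'pos : 0 < d'.length := List.length_pos_iff.2 hd'ne
            have hfit' : d'.length ≤ c'.length - pvCut c' d' := by
              have := hocc'.length_le
              rw [List.length_drop] at this
              omega
            have h2 := pv_occ_through hc'take hocc'
            have h3 := pv_mc_le_mem (c := c) hd'mem
            exact pv_not_occ_lt_cut (by omega : pvCut c' d' < pvCut c d') h2
          omega
        rw [hmc', List.take_length]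
        have hmin : min n M = n := by omega
        rw [hmin, hsc', hc']
    · rw [if_neg hin]
      have hf : PySem.Chars.find c d = -1 := by
        by_contra hcon
        exact hin ((pv_isIn_iff c d).2 hcon)
      have hcut : pvCut c d = c.length := by unfold pvCut; rw [if_pos hf]
      have hmin : min (pvCut c d) (pvMinCut c rest) = pvMinCut c rest := by
        have := pv_mc_le_len c rest
        omega
      rw [hmin]
      exact ih c hPrest hQrest hsc

-- ---- B-side: minD over the filtered find positions is the minimum cut ----

theorem pv_foldr_min_pull (xs : List Int) : ∀ a b : Int,
    xs.foldr min (min a b) = min b (xs.foldr min a) := by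
  induction xs with
  | nil => intro a b; simp; omega
  | cons x xs ih =>
    intro a b
    simp only [List.foldr_cons, ih a b]
    omega

theorem pv_foldl_min_eq (xs : List Int) : ∀ a : Int, xs.foldl min a = xs.foldr min a := by
  induction xs with
  | nil => intro a; rfl
  | cons x xs ih =>
    intro a
    rw [List.foldl_cons, ih (min a x), List.foldr_cons, pv_foldr_min_pull]

theorem pv_minD_cons (a : Int) (xs : List Int) (dflt : Int) :
    PySem.List.minD (a :: xs) (fun p => p) dflt = xs.foldr min a := by
  rw [← pv_foldl_min_eq, PySem.List.minD]
  suffices h : ∀ (ys : List Int) (b : Int),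
      PySem.List.min? (b :: ys) (fun p => p) = some (ys.foldl min b) by
    rw [h xs a]; rfl
  intro ys
  induction ys with
  | nil => intro b; rfl
  | cons y ys ih =>
    intro b
    have h1 : PySem.List.min? (b :: y :: ys) (fun p => p) =
        PySem.List.min? (min b y :: ys) (fun p => p) := by
      rw [PySem.List.min?, PySem.List.min?, List.foldl_cons, List.foldl_cons, List.foldl_cons]
      congr 1
      by_cases hy : y < b
      · simp [hy]
        omega
      · simp [hy]
        omega
    rw [h1, ih (min b y), List.foldl_cons]

theorem pv_foldr_min_default (xs : List Int) : ∀ a dflt : Int, (∀ x ∈ xs, x ≤ dflt) →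
    a ≤ dflt → xs.foldr min a = min a (xs.foldr min dflt) := by
  induction xs with
  | nil => intro a dflt _ h; simp; omega
  | cons x xs ih =>
    intro a dflt h ha
    have h1 := h x List.mem_cons_self
    rw [List.foldr_cons, List.foldr_cons, ih a dflt (fun y hy => h y (List.mem_cons_of_mem _ hy)) ha]
    omega

theorem pv_minD_eq_foldr (xs : List Int) (dflt : Int) (h : ∀ x ∈ xs, x ≤ dflt) :
    PySem.List.minD xs (fun p => p) dflt = xs.foldr min dflt := by
  cases xs with
  | nil => rfl
  | cons a xs =>
    rw [pv_minD_cons, List.foldr_cons]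
    exact pv_foldr_min_default xs a dflt (fun y hy => h y (List.mem_cons_of_mem _ hy))
      (h a List.mem_cons_self)

theorem pv_B_foldr (c : List Char) : ∀ ds : List (List Char),
    ((ds.map (fun d => PySem.Chars.find c d)).filter (fun p => p != -1)).foldr min
        (c.length : Int) = (pvMinCut c ds : Int) := by
  intro ds
  induction ds with
  | nil => simp [pvMinCut]
  | cons d rest ih =>
    rw [List.map_cons, pv_mc_cons, List.filter_cons]
    by_cases hf : PySem.Chars.find c d = -1
    · have hb : (PySem.Chars.find c d != -1) = false := by simp [hf]
      rw [hb]
      simp only [Bool.false_eq_true, if_false]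
      rw [ih]
      have hcut : pvCut c d = c.length := by unfold pvCut; rw [if_pos hf]
      have hle := pv_mc_le_len c rest
      rw [hcut]
      push_cast
      omega
    · have hb : (PySem.Chars.find c d != -1) = true := by simp [hf]
      rw [hb, if_pos rfl, List.foldr_cons, ih]
      have h0 : 0 ≤ PySem.Chars.find c d := by
        have := PySem.Chars.neg_one_le_find c d; omega
      have hcut : (pvCut c d : Int) = PySem.Chars.find c d := by
        unfold pvCut
        rw [if_neg hf]
        omega
      push_cast
      omega

theorem pv_minD_main (c : List Char) (ds : List (List Char)) :
    PySem.List.minD ((ds.map (fun d => PySem.Chars.find c d)).filter (fun p => p != -1))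
        (fun p => p) (c.length : Int) = (pvMinCut c ds : Int) := by
  rw [pv_minD_eq_foldr, pv_B_foldr]
  intro x hx
  rw [List.mem_filter] at hx
  obtain ⟨hx1, _⟩ := hx
  rw [List.mem_map] at hx1
  obtain ⟨d, _, rfl⟩ := hx1
  exact PySem.Chars.find_le_length c d

-- ---- Str → Chars bridges for both ports ----

theorem pv_step_str (c d : String) :
    (if PySem.Str.isIn d c then
        PySem.Str.strip (((PySem.Str.splitMax? c d 1).getD []).headD "")
      else c).toList = pvStep c.toList d.toList := by
  unfold pvStep
  have hiff : PySem.Str.isIn d c = PySem.Chars.isIn d.toList c.toList := rfl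
  rw [hiff]
  by_cases hin : PySem.Chars.isIn d.toList c.toList = true
  · rw [if_pos hin, if_pos hin, PySem.Str.toList_strip]
    congr 1
    rw [PySem.Str.splitMax?]
    cases hx : PySem.Chars.splitMax? c.toList d.toList 1 with
    | none => simp
    | some xs =>
      simp only [Option.map_some, Option.getD_some]
      cases xs with
      | nil => simp
      | cons y ys => simp
  · rw [if_neg hin, if_neg hin]

theorem pv_foldl_str (ds : List String) : ∀ c : String,
    (ds.foldl (fun c d =>
        if PySem.Str.isIn d c then
          PySem.Str.strip (((PySem.Str.splitMax? c d 1).getD []).headD "")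
        else c) c).toList = pvLoop c.toList (ds.map String.toList) := by
  induction ds with
  | nil => intro c; rfl
  | cons d rest ih =>
    intro c
    rw [List.foldl_cons, List.map_cons]
    have : pvLoop c.toList (d.toList :: rest.map String.toList) =
        pvLoop (pvStep c.toList d.toList) (rest.map String.toList) := rfl
    rw [this, ← pv_step_str c d, ih]

-- string emptiness via toList
theorem pv_str_eq_of_toList {s t : String} (h : s.toList = t.toList) : s = t := by
  have h1 : String.ofList s.toList = s := String.ofList_toList
  have h2 : String.ofList t.toList = t := String.ofList_toList
  rw [← h1, ← h2, h]

-- ===== VERDICT (by name: the statement is the Claim_ definition above) =====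
theorem sanitize_window_id_py_spec : Claim_equal_sanitize_window_id_py := by
  intro value _
  unfold Spec_sanitize_window_id_py sanitize_window_id_py sanitize_window_id_py_alt
  cases value with
  | none => rfl
  | some v =>
    simp only
    by_cases hv : v = ""
    · rw [if_pos hv, if_pos hv]
    · rw [if_neg hv, if_neg hv]
      by_cases hcl : PySem.Str.strip v = ""
      · rw [if_pos hcl, if_pos hcl]
      · rw [if_neg hcl, if_neg hcl]
        have hsc : PySem.Chars.strip (PySem.Str.strip v).toList = (PySem.Str.strip v).toList := by
          rw [PySem.Str.toList_strip]
          exact pv_strip_idem _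
        -- the cut position B computes is the minimum cut
        have hcut : PySem.List.minD ((((["-->", "align:start", "|", "#"] : List String)).map
              (fun d => PySem.Str.find (PySem.Str.strip v) d)).filter (fun p => p != -1))
              (fun p => p) (PySem.Str.len (PySem.Str.strip v)) =
            ((pvMinCut (PySem.Str.strip v).toList ((["-->", "align:start", "|", "#"] :
              List String).map String.toList) : Nat) : Int) := by
          have hfindmap : ((["-->", "align:start", "|", "#"] : List String)).map
              (fun d => PySem.Str.find (PySem.Str.strip v) d) =
              (((["-->", "align:start", "|", "#"] : List String)).map String.toList).map
                (fun d => PySem.Chars.find (PySem.Str.strip v).toList d) := by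
            simp [PySem.Str.find_eq]
          rw [hfindmap, PySem.Str.len_eq]
          exact pv_minD_main (PySem.Str.strip v).toList _
        -- B's computed string, reduced to the strip of the minimum-cut prefix
        have hB : (PySem.Str.strip (PySem.Str.slice (PySem.Str.strip v) none
              (some (PySem.List.minD ((((["-->", "align:start", "|", "#"] : List String)).map
                (fun d => PySem.Str.find (PySem.Str.strip v) d)).filter (fun p => p != -1))
                (fun p => p) (PySem.Str.len (PySem.Str.strip v)))))).toList =
            PySem.Chars.strip ((PySem.Str.strip v).toList.take
              (pvMinCut (PySem.Str.strip v).toList ((["-->", "align:start", "|", "#"] :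
                List String).map String.toList))) := by
          rw [PySem.Str.toList_strip, PySem.Str.toList_slice, PySem.Chars.slice_eq_listSlice, hcut]
          rw [PySem.List.slice_to _ (by positivity)]
          rw [Int.toNat_natCast]
        -- A's loop, reduced to the same string
        have hkey : (((["-->", "align:start", "|", "#"] : List String)).foldl (fun c d =>
            if PySem.Str.isIn d c then
              PySem.Str.strip (((PySem.Str.splitMax? c d 1).getD []).headD "")
            else c) (PySem.Str.strip v)) =
            PySem.Str.strip (PySem.Str.slice (PySem.Str.strip v) none
              (some (PySem.List.minD ((((["-->", "align:start", "|", "#"] : List String)).map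
                (fun d => PySem.Str.find (PySem.Str.strip v) d)).filter (fun p => p != -1))
                (fun p => p) (PySem.Str.len (PySem.Str.strip v))))) := by
          apply pv_str_eq_of_toList
          rw [pv_foldl_str, hB]
          have e1 : ("-->" : String).toList = ['-', '-', '>'] := rfl
          have e2 : ("align:start" : String).toList =
            ['a', 'l', 'i', 'g', 'n', ':', 's', 't', 'a', 'r', 't'] := rfl
          have e3 : ("|" : String).toList = ['|'] := rfl
          have e4 : ("#" : String).toList = ['#'] := rfl
          have hP : ∀ d ∈ (["-->", "align:start", "|", "#"] : List String).map String.toList,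
              d ≠ [] ∧ ∀ a ∈ d, PySem.Chars.isspace a = false := by
            intro d hd
            simp only [List.map_cons, List.map_nil, e1, e2, e3, e4, List.mem_cons,
              List.not_mem_nil, or_false] at hd
            rcases hd with rfl | rfl | rfl | rfl <;>
              exact ⟨by simp, by simp [PySem.Chars.isspace]⟩
          have hQ : ((["-->", "align:start", "|", "#"] : List String).map String.toList).Pairwise
              (fun d d' => d.headI ∉ d') := by
            simp only [List.map_cons, List.map_nil, e1, e2, e3, e4]
            refine List.Pairwise.cons ?_ (List.Pairwise.cons ?_ (List.Pairwise.cons ?_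
              (List.Pairwise.cons ?_ List.Pairwise.nil))) <;> simp
          exact pv_main ((["-->", "align:start", "|", "#"] : List String).map String.toList)
            (PySem.Str.strip v).toList hP hQ hsc
        rw [hkey]
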